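-- pv_equiv track=rewrite | github.com/rueckstiess/origami-jsynth | origami_jsynth/baselines/tabdiff.py | _get_column_name_mapping
-- ===== SOURCE A (Python) =====
-- def _get_column_name_mapping(
--     num_col_idx: list[int],
--     cat_col_idx: list[int],
--     target_col_idx: list[int],
--     column_names: list[str],
-- ) -> tuple[dict, dict, dict]:
--     idx_mapping: dict[int, int] = {}
--     curr_num = 0
--     curr_cat = len(num_col_idx)
--     curr_target = curr_cat + len(cat_col_idx)
--     for idx in range(len(column_names)):
--         if idx in num_col_idx:
--             idx_mapping[idx] = curr_num
--             curr_num += 1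
--         elif idx in cat_col_idx:
--             idx_mapping[idx] = curr_cat
--             curr_cat += 1
--         else:
--             idx_mapping[idx] = curr_target
--             curr_target += 1
--     inverse_idx_mapping = {v: k for k, v in idx_mapping.items()}
--     idx_name_mapping = {i: column_names[i] for i in range(len(column_names))}
--     return (
--         {str(k): v for k, v in idx_mapping.items()},
--         {str(k): v for k, v in inverse_idx_mapping.items()},
--         {str(k): v for k, v in idx_name_mapping.items()},
--     )
-- ===== SOURCE B (Python) =====
-- def _get_column_name_mapping(
--     num_col_idx: list[int],
--     cat_col_idx: list[int],
--     target_col_idx: list[int],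
--     column_names: list[str],
-- ) -> tuple[dict, dict, dict]:
--     n = len(column_names)
--     # partition the column indices into the three classes (three filter passes)
--     num_list = [i for i in range(n) if i in num_col_idx]
--     cat_list = [i for i in range(n) if i not in num_col_idx and i in cat_col_idx]
--     tgt_list = [i for i in range(n) if i not in num_col_idx and i not in cat_col_idx]
--     # assign each class its block of positions into a value table
--     vals = [0] * n
--     for pos, i in enumerate(num_list):
--         vals[i] = pos
--     cat_base = len(num_col_idx)
--     for pos, i in enumerate(cat_list):
--         vals[i] = cat_base + pos
--     tgt_base = cat_base + len(cat_col_idx)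
--     for pos, i in enumerate(tgt_list):
--         vals[i] = tgt_base + pos
--     idx_mapping = {str(i): vals[i] for i in range(n)}
--     inverse = {}
--     for i, v in enumerate(vals):
--         inverse[v] = i
--     inverse_idx_mapping = {str(v): k for v, k in inverse.items()}
--     idx_name_mapping = {str(i): name for i, name in enumerate(column_names)}
--     return idx_mapping, inverse_idx_mapping, idx_name_mapping
-- ===== Notes on version B (the rewrite author's own statement) =====
-- stated objective: alternative
-- what changed: Replaces A's single pass with three running counters by a partition-then-assign scheme: three filter passes split the column indices into numeric/categorical/target lists, each class then writes its enumerated block of positions into a value table, and the three dicts are built from that table.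
import Mathlib
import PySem

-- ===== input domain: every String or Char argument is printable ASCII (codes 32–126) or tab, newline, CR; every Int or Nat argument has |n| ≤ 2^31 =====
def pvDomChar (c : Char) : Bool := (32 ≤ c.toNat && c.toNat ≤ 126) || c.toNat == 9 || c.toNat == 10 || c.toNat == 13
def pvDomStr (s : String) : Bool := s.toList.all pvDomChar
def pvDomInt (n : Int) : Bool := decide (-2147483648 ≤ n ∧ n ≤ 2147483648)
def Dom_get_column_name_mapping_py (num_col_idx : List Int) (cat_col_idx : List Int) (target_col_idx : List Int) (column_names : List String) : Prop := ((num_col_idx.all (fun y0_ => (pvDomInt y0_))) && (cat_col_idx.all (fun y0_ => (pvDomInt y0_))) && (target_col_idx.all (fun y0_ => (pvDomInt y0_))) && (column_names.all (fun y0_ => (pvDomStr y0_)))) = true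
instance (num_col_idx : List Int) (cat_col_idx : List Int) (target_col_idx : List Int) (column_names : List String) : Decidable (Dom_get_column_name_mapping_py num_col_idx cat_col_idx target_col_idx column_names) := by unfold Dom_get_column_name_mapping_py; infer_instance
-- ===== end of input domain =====

-- B replaces A's running-counter single pass by a partition-then-assign scheme (three class
-- filters, block position assignment into a value table); alternative decomposition, same cost.

-- ===== PORT A =====
-- Literal port of A: one loop over range(len(column_names)) carrying the dict and the three
-- running counters; column_names[i] is always in range here, so pyGetD is exact.
def get_column_name_mapping_py (num_col_idx : List Int) (cat_col_idx : List Int) (target_col_idx : List Int) (column_names : List String) : (List (String × Int)) × (List (String × Int)) × (List (String × String)) :=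
  let st := (PySem.List.pyRange 0 (column_names.length : Int) 1).foldl
    (fun (s : PySem.Dict Int Int × Int × Int × Int) idx =>
      if num_col_idx.contains idx then (s.1.insert idx s.2.1, s.2.1 + 1, s.2.2.1, s.2.2.2)
      else if cat_col_idx.contains idx then (s.1.insert idx s.2.2.1, s.2.1, s.2.2.1 + 1, s.2.2.2)
      else (s.1.insert idx s.2.2.2, s.2.1, s.2.2.1, s.2.2.2 + 1))
    (PySem.Dict.empty, 0, (num_col_idx.length : Int), (num_col_idx.length : Int) + (cat_col_idx.length : Int))
  let idx_mapping := st.1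
  let inverse_idx_mapping := idx_mapping.items.foldl (fun (d : PySem.Dict Int Int) p => d.insert p.2 p.1) PySem.Dict.empty
  let idx_name_mapping := (PySem.List.pyRange 0 (column_names.length : Int) 1).foldl
    (fun (d : PySem.Dict Int String) i => d.insert i (PySem.List.pyGetD column_names i "")) PySem.Dict.empty
  ((idx_mapping.items.foldl (fun (d : PySem.Dict String Int) p => d.insert (PySem.Int.toStr p.1) p.2) PySem.Dict.empty).items,
   (inverse_idx_mapping.items.foldl (fun (d : PySem.Dict String Int) p => d.insert (PySem.Int.toStr p.1) p.2) PySem.Dict.empty).items,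
   (idx_name_mapping.items.foldl (fun (d : PySem.Dict String String) p => d.insert (PySem.Int.toStr p.1) p.2) PySem.Dict.empty).items)

-- ===== PORT B =====
-- Literal port of B: partition the indices into three lists, write each class's enumerated
-- block of positions into a value table, then build the three dicts from the table.
def get_column_name_mapping_py_alt (num_col_idx : List Int) (cat_col_idx : List Int) (target_col_idx : List Int) (column_names : List String) : (List (String × Int)) × (List (String × Int)) × (List (String × String)) :=
  let r := PySem.List.pyRange 0 (column_names.length : Int) 1
  let num_list := r.filter (fun i => num_col_idx.contains i)
  let cat_list := r.filter (fun i => !num_col_idx.contains i && cat_col_idx.contains i)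
  let tgt_list := r.filter (fun i => !num_col_idx.contains i && !cat_col_idx.contains i)
  let vals0 := List.replicate column_names.length (0 : Int)
  let vals1 := (PySem.List.enumerate num_list).foldl (fun v p => PySem.List.pySetD v p.2 p.1) vals0
  let cat_base : Int := num_col_idx.length
  let vals2 := (PySem.List.enumerate cat_list).foldl (fun v p => PySem.List.pySetD v p.2 (cat_base + p.1)) vals1
  let tgt_base : Int := cat_base + (cat_col_idx.length : Int)
  let vals := (PySem.List.enumerate tgt_list).foldl (fun v p => PySem.List.pySetD v p.2 (tgt_base + p.1)) vals2
  let idx_mapping := r.foldl (fun (d : PySem.Dict String Int) i => d.insert (PySem.Int.toStr i) (PySem.List.pyGetD vals i 0)) PySem.Dict.empty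
  let inverse := (PySem.List.enumerate vals).foldl (fun (d : PySem.Dict Int Int) p => d.insert p.2 p.1) PySem.Dict.empty
  let inverse_idx_mapping := inverse.items.foldl (fun (d : PySem.Dict String Int) p => d.insert (PySem.Int.toStr p.1) p.2) PySem.Dict.empty
  let idx_name_mapping := (PySem.List.enumerate column_names).foldl (fun (d : PySem.Dict String String) p => d.insert (PySem.Int.toStr p.1) p.2) PySem.Dict.empty
  (idx_mapping.items, inverse_idx_mapping.items, idx_name_mapping.items)

-- ===== PRECONDITION & SPEC =====
def Spec_get_column_name_mapping_py (num_col_idx : List Int) (cat_col_idx : List Int) (target_col_idx : List Int) (column_names : List String) (out : (List (String × Int)) × (List (String × Int)) × (List (String × String))) : Prop := out = get_column_name_mapping_py_alt num_col_idx cat_col_idx target_col_idx column_names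
instance (num_col_idx : List Int) (cat_col_idx : List Int) (target_col_idx : List Int) (column_names : List String) (out : (List (String × Int)) × (List (String × Int)) × (List (String × String))) : Decidable (Spec_get_column_name_mapping_py num_col_idx cat_col_idx target_col_idx column_names out) := by unfold Spec_get_column_name_mapping_py; infer_instance

-- ===== CLAIM (what is proved, stated in full; the proofs are below) =====
def Claim_equal_get_column_name_mapping_py : Prop := ∀ (num_col_idx : List Int) (cat_col_idx : List Int) (target_col_idx : List Int) (column_names : List String), Dom_get_column_name_mapping_py num_col_idx cat_col_idx target_col_idx column_names → Spec_get_column_name_mapping_py num_col_idx cat_col_idx target_col_idx column_names (get_column_name_mapping_py num_col_idx cat_col_idx target_col_idx column_names)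

-- ===== LEMMAS AND PROOFS =====

-- number of indices j in [0, i) whose class predicate holds
def pvCnt (p : Int → Bool) (i : Nat) : Int := (((PySem.List.pyRange 0 (i : Int) 1).filter p).length : Int)

-- the value A's running counters assign to column index i
def pvF (num cat : List Int) (i : Nat) : Int :=
  if num.contains (i : Int) then pvCnt (fun j => num.contains j) i
  else if cat.contains (i : Int) then (num.length : Int) + pvCnt (fun j => !num.contains j && cat.contains j) i
  else (num.length : Int) + (cat.length : Int) + pvCnt (fun j => !num.contains j && !cat.contains j) i

def pvModel (num cat : List Int) (n : Nat) : List (Int × Int) :=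
  (List.range n).map (fun (i : Nat) => ((i : Int), pvF num cat i))

-- one block-assignment pass of B
def pvBlock (g : Int → Int) (l : List Int) (v : List Int) : List Int :=
  (PySem.List.enumerate l).foldl (fun v p => PySem.List.pySetD v p.2 (g p.1)) v

-- B's finished value table
def pvVals (num cat : List Int) (n : Nat) : List Int :=
  pvBlock (fun x => (num.length : Int) + (cat.length : Int) + x)
    ((PySem.List.pyRange 0 (n : Int) 1).filter (fun j => !num.contains j && !cat.contains j))
    (pvBlock (fun x => (num.length : Int) + x)
      ((PySem.List.pyRange 0 (n : Int) 1).filter (fun j => !num.contains j && cat.contains j))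
      (pvBlock (fun x => x)
        ((PySem.List.pyRange 0 (n : Int) 1).filter (fun j => num.contains j))
        (List.replicate n (0 : Int))))

lemma pvCnt_succ (p : Int → Bool) (n : Nat) :
    pvCnt p (n + 1) = pvCnt p n + (if p (n : Int) then 1 else 0) := by
  unfold pvCnt
  rw [show (((n + 1 : Nat) : Int)) = (n : Int) + 1 by push_cast; ring,
    PySem.List.pyRange_one_succ_right (by positivity)]
  rw [List.filter_append]
  split_ifs with h <;> simp [h]

lemma A_loop (num cat : List Int) (n : Nat) :
    (PySem.List.pyRange 0 (n : Int) 1).foldl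
      (fun (s : PySem.Dict Int Int × Int × Int × Int) idx =>
        if num.contains idx then (s.1.insert idx s.2.1, s.2.1 + 1, s.2.2.1, s.2.2.2)
        else if cat.contains idx then (s.1.insert idx s.2.2.1, s.2.1, s.2.2.1 + 1, s.2.2.2)
        else (s.1.insert idx s.2.2.2, s.2.1, s.2.2.1, s.2.2.2 + 1))
      (PySem.Dict.empty, 0, (num.length : Int), (num.length : Int) + (cat.length : Int))
    = (PySem.Dict.mk (pvModel num cat n),
       pvCnt (fun j => num.contains j) n,
       (num.length : Int) + pvCnt (fun j => !num.contains j && cat.contains j) n,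
       (num.length : Int) + (cat.length : Int) + pvCnt (fun j => !num.contains j && !cat.contains j) n) := by
  induction n with
  | zero =>
    rw [PySem.List.pyRange_one_eq_nil (by simp)]
    simp [pvModel, pvCnt, PySem.List.pyRange_one_eq_nil (le_refl 0), PySem.Dict.empty]
  | succ m ih =>
    rw [show (((m + 1 : Nat) : Int)) = (m : Int) + 1 by push_cast; ring,
      PySem.List.pyRange_one_succ_right (by positivity), List.foldl_append, ih]
    have hnotmem : (PySem.Dict.mk (pvModel num cat m)).contains ((m : Int)) = false := by
      rw [PySem.Dict.contains_mk]
      simp only [List.any_eq_false, pvModel]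
      rintro p hp
      simp only [List.mem_map, List.mem_range] at hp
      obtain ⟨i, hi, rfl⟩ := hp
      have hne : i ≠ m := by omega
      simp [hne]
    have hins : ∀ w : Int, (PySem.Dict.mk (pvModel num cat m)).insert ((m : Int)) w
        = PySem.Dict.mk (pvModel num cat m ++ [((m : Int), w)]) := by
      intro w
      apply PySem.Dict.ext
      rw [PySem.Dict.items_insert_of_not_contains _ _ hnotmem]
    have hmodel : ∀ w : Int, w = pvF num cat m →
        pvModel num cat m ++ [((m : Int), w)] = pvModel num cat (m + 1) := by
      intro w hw
      simp [pvModel, List.range_succ, hw]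
    simp only [List.foldl_cons, List.foldl_nil]
    by_cases h1 : ((m : Int)) ∈ num
    · have h1' : num.contains ((m : Int)) = true := by simpa using h1
      rw [if_pos h1', hins, hmodel (pvCnt (fun j => num.contains j) m) (by simp [pvF, h1])]
      simp only [Prod.mk.injEq, pvCnt_succ]
      simp [h1]
    · have h1' : num.contains ((m : Int)) = false := by simpa using h1
      by_cases h2 : ((m : Int)) ∈ cat
      · have h2' : cat.contains ((m : Int)) = true := by simpa using h2
        rw [if_neg (by simp [h1]), if_pos h2', hins,
          hmodel ((num.length : Int) + pvCnt (fun j => !num.contains j && cat.contains j) m)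
            (by simp [pvF, h1, h2])]
        simp only [Prod.mk.injEq, pvCnt_succ]
        simp [h1, h2, add_assoc]
      · have h2' : cat.contains ((m : Int)) = false := by simpa using h2
        rw [if_neg (by simp [h1]), if_neg (by simp [h2]), hins,
          hmodel ((num.length : Int) + (cat.length : Int)
              + pvCnt (fun j => !num.contains j && !cat.contains j) m)
            (by simp [pvF, h1, h2])]
        simp only [Prod.mk.injEq, pvCnt_succ]
        simp [h1, h2, add_assoc]

lemma foldl_pySetD_length (g : Int → Int) :
    ∀ (ps : List (Int × Int)) (v : List Int),
      (ps.foldl (fun v p => PySem.List.pySetD v p.2 (g p.1)) v).length = v.length := by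
  intro ps
  induction ps with
  | nil => intro v; rfl
  | cons p ps ih => intro v; rw [List.foldl_cons, ih, PySem.List.length_pySetD]

lemma foldl_pySetD_ne (g : Int → Int) (i : Nat) :
    ∀ (ps : List (Int × Int)) (v : List Int),
      (∀ p ∈ ps, ∃ m : Nat, p.2 = (m : Int) ∧ m < v.length) → ((i : Int) ∉ ps.map (·.2)) →
      PySem.List.pyGetD (ps.foldl (fun v p => PySem.List.pySetD v p.2 (g p.1)) v) (i : Int) 0
        = PySem.List.pyGetD v (i : Int) 0 := by
  intro ps
  induction ps with
  | nil => intro v _ _; rfl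
  | cons p ps ih =>
    intro v hmem hni
    obtain ⟨m, hm, hlt⟩ := hmem p (List.mem_cons_self)
    simp only [List.map_cons, List.mem_cons, not_or] at hni
    rw [List.foldl_cons, ih _ (fun q hq => by
        obtain ⟨m', hm', hlt'⟩ := hmem q (List.mem_cons_of_mem _ hq)
        exact ⟨m', hm', by rwa [PySem.List.length_pySetD]⟩)
      (by simpa using hni.2)]
    rw [hm, PySem.List.pyGetD_pySetD_natCast _ _ _ _ _ hlt]
    have : i ≠ m := by
      intro h; exact hni.1 (by rw [hm, h])
    simp [this]

lemma pvBlock_ne (g : Int → Int) (i : Nat) (l v : List Int)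
    (hl : ∀ j ∈ l, ∃ m : Nat, j = (m : Int) ∧ m < v.length) (hni : (i : Int) ∉ l) :
    PySem.List.pyGetD (pvBlock g l v) (i : Int) 0 = PySem.List.pyGetD v (i : Int) 0 := by
  apply foldl_pySetD_ne
  · intro p hp
    exact hl p.2 (by
      have := List.mem_map_of_mem (f := (·.2)) hp
      rwa [PySem.List.map_snd_enumerate] at this)
  · rwa [PySem.List.map_snd_enumerate]

lemma pvBlock_length (g : Int → Int) (l v : List Int) :
    (pvBlock g l v).length = v.length := foldl_pySetD_length g _ v

lemma pvBlock_hit (g : Int → Int) (i : Nat) (l1 l2 v : List Int)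
    (h1 : ∀ j ∈ l1, ∃ m : Nat, j = (m : Int) ∧ m < v.length)
    (h2 : ∀ j ∈ l2, ∃ m : Nat, j = (m : Int) ∧ m < v.length)
    (hni2 : (i : Int) ∉ l2) (hi : i < v.length) :
    PySem.List.pyGetD (pvBlock g (l1 ++ (i : Int) :: l2) v) (i : Int) 0 = g ((l1.length : Int)) := by
  unfold pvBlock
  rw [PySem.List.enumerate_append, PySem.List.enumerate_cons, List.foldl_append, List.foldl_cons]
  have hlen1 : ((PySem.List.enumerate l1 0).foldl (fun v p => PySem.List.pySetD v p.2 (g p.1)) v).length = v.length :=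
    foldl_pySetD_length g _ v
  set v1 := (PySem.List.enumerate l1 0).foldl (fun v p => PySem.List.pySetD v p.2 (g p.1)) v with hv1
  have hne : PySem.List.pyGetD
      ((PySem.List.enumerate l2 (0 + (l1.length : Int) + 1)).foldl
        (fun v p => PySem.List.pySetD v p.2 (g p.1)) (PySem.List.pySetD v1 ((i : Int)) (g (0 + (l1.length : Int)))))
      (i : Int) 0
      = PySem.List.pyGetD (PySem.List.pySetD v1 ((i : Int)) (g (0 + (l1.length : Int)))) (i : Int) 0 := by
    apply foldl_pySetD_ne
    · intro p hp
      have hp2 : p.2 ∈ l2 := by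
        have := List.mem_map_of_mem (f := (·.2)) hp
        rwa [PySem.List.map_snd_enumerate] at this
      obtain ⟨m, hm, hlt⟩ := h2 p.2 hp2
      exact ⟨m, hm, by rwa [PySem.List.length_pySetD, hlen1]⟩
    · rwa [PySem.List.map_snd_enumerate]
  rw [hne, PySem.List.pyGetD_pySetD_natCast _ _ _ _ _ (by rwa [hlen1])]
  simp

lemma filter_range_split (q : Int → Bool) (i n : Nat) (hin : i < n) (hq : q (i : Int) = true) :
    (PySem.List.pyRange 0 (n : Int) 1).filter q
      = ((PySem.List.pyRange 0 (i : Int) 1).filter q)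
        ++ (i : Int) :: ((PySem.List.pyRange ((i : Int) + 1) (n : Int) 1).filter q) := by
  rw [PySem.List.pyRange_one_append 0 (i : Int) (n : Int) (by positivity) (by exact_mod_cast hin.le),
    PySem.List.pyRange_one_cons (a := (i : Int)) (b := (n : Int)) (by exact_mod_cast hin)]
  simp [List.filter_append, hq]

lemma mem_filter_pyRange_cast (q : Int → Bool) {a b : Int} (n : Nat) (h0 : 0 ≤ a) (hb : b ≤ (n : Int)) :
    ∀ j ∈ (PySem.List.pyRange a b 1).filter q, ∃ m : Nat, j = (m : Int) ∧ m < n := by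
  intro j hj
  have hm := List.mem_of_mem_filter hj
  rw [PySem.List.mem_pyRange_one] at hm
  exact ⟨j.toNat, by omega, by omega⟩

lemma pvVals_length (num cat : List Int) (n : Nat) : (pvVals num cat n).length = n := by
  unfold pvVals
  rw [pvBlock_length, pvBlock_length, pvBlock_length, List.length_replicate]

lemma pvVals_get (num cat : List Int) (n i : Nat) (hi : i < n) :
    PySem.List.pyGetD (pvVals num cat n) (i : Int) 0 = pvF num cat i := by
  have hlen0 : (List.replicate n (0 : Int)).length = n := List.length_replicate
  have hlen1 : (pvBlock (fun x => x)
      ((PySem.List.pyRange 0 (n : Int) 1).filter (fun j => num.contains j))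
      (List.replicate n (0 : Int))).length = n := by rw [pvBlock_length, hlen0]
  have hlen2 : (pvBlock (fun x => (num.length : Int) + x)
      ((PySem.List.pyRange 0 (n : Int) 1).filter (fun j => !num.contains j && cat.contains j))
      (pvBlock (fun x => x)
        ((PySem.List.pyRange 0 (n : Int) 1).filter (fun j => num.contains j))
        (List.replicate n (0 : Int)))).length = n := by rw [pvBlock_length, hlen1]
  unfold pvVals
  by_cases h1 : ((i : Int)) ∈ num
  · -- numeric: outer two blocks leave index i alone, the first block hits it
    rw [pvBlock_ne _ i _ _ (by rw [hlen2]; exact mem_filter_pyRange_cast _ n le_rfl le_rfl)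
        (by intro hmem; have := List.of_mem_filter hmem; simp [h1] at this),
      pvBlock_ne _ i _ _ (by rw [hlen1]; exact mem_filter_pyRange_cast _ n le_rfl le_rfl)
        (by intro hmem; have := List.of_mem_filter hmem; simp [h1] at this)]
    rw [filter_range_split _ i n hi (by simpa using h1)]
    rw [pvBlock_hit _ i _ _ _
      (by rw [hlen0]; exact mem_filter_pyRange_cast _ n le_rfl (by exact_mod_cast hi.le))
      (by rw [hlen0]; exact mem_filter_pyRange_cast _ n (by positivity) le_rfl)
      (by intro hmem; have := List.mem_of_mem_filter hmem; rw [PySem.List.mem_pyRange_one] at this; omega)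
      (by rwa [hlen0])]
    simp [pvF, pvCnt, h1]
  · by_cases h2 : ((i : Int)) ∈ cat
    · -- categorical: outer block leaves i alone, middle block hits it
      rw [pvBlock_ne _ i _ _ (by rw [hlen2]; exact mem_filter_pyRange_cast _ n le_rfl le_rfl)
          (by intro hmem; have := List.of_mem_filter hmem; simp [h2] at this)]
      rw [filter_range_split (fun j => !num.contains j && cat.contains j) i n hi (by simp [h1, h2])]
      rw [pvBlock_hit _ i _ _ _
        (by rw [hlen1]; exact mem_filter_pyRange_cast _ n le_rfl (by exact_mod_cast hi.le))
        (by rw [hlen1]; exact mem_filter_pyRange_cast _ n (by positivity) le_rfl)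
        (by intro hmem; have := List.mem_of_mem_filter hmem; rw [PySem.List.mem_pyRange_one] at this; omega)
        (by rwa [hlen1])]
      simp [pvF, pvCnt, h1, h2]
    · -- target: the outer block hits i
      rw [filter_range_split (fun j => !num.contains j && !cat.contains j) i n hi (by simp [h1, h2])]
      rw [pvBlock_hit _ i _ _ _
        (by rw [hlen2]; exact mem_filter_pyRange_cast _ n le_rfl (by exact_mod_cast hi.le))
        (by rw [hlen2]; exact mem_filter_pyRange_cast _ n (by positivity) le_rfl)
        (by intro hmem; have := List.mem_of_mem_filter hmem; rw [PySem.List.mem_pyRange_one] at this; omega)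
        (by rwa [hlen2])]
      simp [pvF, pvCnt, h1, h2]

lemma enumerate_eq_map_range {α : Type} (d : α) (xs : List α) :
    PySem.List.enumerate xs = (List.range xs.length).map (fun (i : Nat) => ((i : Int), xs.getD i d)) := by
  induction xs using List.reverseRecOn with
  | nil => simp [PySem.List.enumerate_nil]
  | append_singleton xs x ih =>
    rw [PySem.List.enumerate_append, ih]
    simp only [List.length_append, List.length_cons, List.length_nil]
    rw [List.range_succ, List.map_append]
    congr 1
    · apply List.map_congr_left
      intro a ha
      rw [List.mem_range] at ha
      rw [List.getD_append _ _ _ _ ha]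
    · simp [PySem.List.enumerate_cons, PySem.List.enumerate_nil]

lemma str_fold_eq (num cat : List Int) (n : Nat) (vals : List Int)
    (hlen : vals.length = n)
    (hv : ∀ i : Nat, i < n → PySem.List.pyGetD vals (i : Int) 0 = pvF num cat i) :
    (PySem.List.pyRange 0 (n : Int) 1).foldl
        (fun (d : PySem.Dict String Int) i => d.insert (PySem.Int.toStr i) (PySem.List.pyGetD vals i 0))
        PySem.Dict.empty
      = (pvModel num cat n).foldl
        (fun (d : PySem.Dict String Int) p => d.insert (PySem.Int.toStr p.1) p.2) PySem.Dict.empty := by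
  rw [PySem.List.pyRange_zero_nat n]
  unfold pvModel
  rw [List.foldl_map, List.foldl_map]
  apply PySem.List.foldl_congr_mem
  intro acc x hx
  rw [List.mem_range] at hx
  rw [hv x hx]

lemma enum_vals_eq (num cat : List Int) (n : Nat) (vals : List Int)
    (hlen : vals.length = n)
    (hv : ∀ i : Nat, i < n → PySem.List.pyGetD vals (i : Int) 0 = pvF num cat i) :
    PySem.List.enumerate vals = pvModel num cat n := by
  rw [enumerate_eq_map_range (0 : Int), hlen]
  unfold pvModel
  apply List.map_congr_left
  intro a ha
  rw [List.mem_range] at ha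
  have := hv a ha
  rw [PySem.List.pyGetD_natCast] at this
  rw [this]

lemma name_fold_eq (cnames : List String) :
    ((PySem.List.pyRange 0 (cnames.length : Int) 1).foldl
        (fun (d : PySem.Dict Int String) i => d.insert i (PySem.List.pyGetD cnames i "")) PySem.Dict.empty).items.foldl
      (fun (d : PySem.Dict String String) p => d.insert (PySem.Int.toStr p.1) p.2) PySem.Dict.empty
    = (PySem.List.enumerate cnames).foldl
      (fun (d : PySem.Dict String String) p => d.insert (PySem.Int.toStr p.1) p.2) PySem.Dict.empty := by
  have hfresh : ((PySem.List.pyRange 0 (cnames.length : Int) 1).foldl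
      (fun (d : PySem.Dict Int String) i => d.insert i (PySem.List.pyGetD cnames i "")) PySem.Dict.empty).items
      = ([] : List (Int × String)) ++ (PySem.List.pyRange 0 (cnames.length : Int) 1).map
          (fun i => (i, PySem.List.pyGetD cnames i "")) := by
    exact PySem.Dict.items_foldl_insert_fresh _ (fun i => i) (fun i => PySem.List.pyGetD cnames i "")
      PySem.Dict.empty (fun a _ => PySem.Dict.contains_empty a)
      (by simpa using PySem.List.nodup_pyRange_one 0 (cnames.length : Int))
  rw [hfresh, List.nil_append, List.foldl_map]
  rw [enumerate_eq_map_range "" cnames, List.foldl_map, PySem.List.pyRange_zero_nat, List.foldl_map]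
  apply PySem.List.foldl_congr_mem
  intro acc x hx
  rw [List.mem_range] at hx
  rw [PySem.List.pyGetD_natCast]

-- ===== VERDICT (by name: the statement is the Claim_ definition above) =====
set_option maxHeartbeats 2000000 in
theorem get_column_name_mapping_py_spec : Claim_equal_get_column_name_mapping_py := by
  intro num cat tgt cnames _hdom
  unfold Spec_get_column_name_mapping_py
  unfold get_column_name_mapping_py get_column_name_mapping_py_alt
  simp only []
  rw [A_loop num cat cnames.length]
  have hlen := pvVals_length num cat cnames.length
  have hv := fun i hi => pvVals_get num cat cnames.length i hi
  refine congrArg₂ Prod.mk ?_ (congrArg₂ Prod.mk ?_ ?_)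
  · exact congrArg PySem.Dict.items
      ((str_fold_eq num cat cnames.length (pvVals num cat cnames.length) hlen hv).symm)
  · refine congrArg PySem.Dict.items (congrArg (fun l : List (Int × Int) => (l.foldl
        (fun (d : PySem.Dict String Int) p => d.insert (PySem.Int.toStr p.1) p.2) PySem.Dict.empty))
      (congrArg PySem.Dict.items (congrArg (fun l : List (Int × Int) => (l.foldl
        (fun (d : PySem.Dict Int Int) p => d.insert p.2 p.1) PySem.Dict.empty)) ?_)))
    exact (enum_vals_eq num cat cnames.length (pvVals num cat cnames.length) hlen hv).symm
  · exact congrArg PySem.Dict.items (name_fold_eq cnames)
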